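-- pv_equiv track=rewrite | github.com/manwar/perlweeklychallenge-club | challenge-325/ysth/python/ch-1.py | loop
-- ===== SOURCE A (Python) =====
-- def loop(binary_list):
--     current_sequence = 0;
--     longest_sequence = 0;
--     for value in binary_list:
--         if value:
--             current_sequence += 1
--         else:
--             if longest_sequence < current_sequence:
--                 longest_sequence = current_sequence
--             current_sequence = 0
--     if longest_sequence < current_sequence:
--         longest_sequence = current_sequence
--     return longest_sequence
-- ===== SOURCE B (Python) =====
-- def loop(binary_list):
--     # Run-extraction: scan for each maximal truthy run, take max of run lengths.
--     best = 0
--     i = 0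
--     n = len(binary_list)
--     while i < n:
--         if binary_list[i]:
--             j = i
--             while j < n and binary_list[j]:
--                 j += 1
--             best = max(best, j - i)
--             i = j
--         else:
--             i += 1
--     return best
-- ===== Notes on version B (the rewrite author's own statement) =====
-- stated objective: alternative
-- what changed: Replaces the running current/longest counter pair with run extraction: an outer scan finds each maximal truthy run, measures its length with an inner scan, and takes the max of the run lengths.
import Mathlib
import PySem

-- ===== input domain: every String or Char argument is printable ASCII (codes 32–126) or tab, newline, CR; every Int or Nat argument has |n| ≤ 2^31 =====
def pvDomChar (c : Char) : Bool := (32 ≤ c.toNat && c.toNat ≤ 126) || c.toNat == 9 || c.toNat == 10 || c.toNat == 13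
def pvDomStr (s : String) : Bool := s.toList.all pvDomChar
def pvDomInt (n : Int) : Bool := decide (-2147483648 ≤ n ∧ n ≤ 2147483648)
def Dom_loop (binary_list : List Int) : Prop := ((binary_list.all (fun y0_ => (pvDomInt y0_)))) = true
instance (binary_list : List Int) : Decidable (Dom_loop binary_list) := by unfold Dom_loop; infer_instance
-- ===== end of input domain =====

-- B replaces A's running current/longest counters by run extraction (maximal truthy runs, max of their lengths); same O(n) cost, alternative decomposition.


-- ===== PORT A =====
-- the for loop with its (current, longest) state, plus the trailing flush
def loopAux : List Int → Int → Int → Int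
  | [], cur, long => if long < cur then cur else long
  | v :: rest, cur, long =>
    if v ≠ 0 then loopAux rest (cur + 1) long
    else loopAux rest 0 (if long < cur then cur else long)

def loop (binary_list : List Int) : Int := loopAux binary_list 0 0

-- ===== PORT B =====
-- outer scan: skip a falsy element, or measure the maximal truthy run (inner scan = takeWhile)
-- and continue after it (dropWhile), accumulating the best run length
def loopAltAux : List Int → Int → Int
  | [], best => best
  | x :: xs, best =>
    if x ≠ 0 then
      loopAltAux (xs.dropWhile (fun y => y != 0))
        (max best (1 + ((xs.takeWhile (fun y => y != 0)).length : Int)))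
    else loopAltAux xs best
termination_by l _ => l.length
decreasing_by
  · exact Nat.lt_succ_of_le (List.length_dropWhile_le _ _)
  · simp

def loop_alt (binary_list : List Int) : Int := loopAltAux binary_list 0

-- ===== PRECONDITION & SPEC =====
def Spec_loop (binary_list : List Int) (out : Int) : Prop := out = loop_alt binary_list
instance (binary_list : List Int) (out : Int) : Decidable (Spec_loop binary_list out) := by unfold Spec_loop; infer_instance

-- ===== CLAIM (what is proved, stated in full; the proofs are below) =====
def Claim_equal_loop : Prop := ∀ (binary_list : List Int), Dom_loop binary_list → Spec_loop binary_list (loop binary_list)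

-- ===== LEMMAS AND PROOFS =====

-- common reference function: best run ending in the pending count `cur`
def gRun : List Int → Int → Int
  | [], cur => cur
  | v :: rest, cur => if v ≠ 0 then gRun rest (cur + 1) else max cur (gRun rest 0)

theorem gRun_nonneg (l : List Int) : ∀ cur : Int, 0 ≤ cur → 0 ≤ gRun l cur := by
  induction l with
  | nil => intro cur h; simpa [gRun] using h
  | cons v rest ih =>
    intro cur h
    by_cases hv : v ≠ 0 <;> simp [gRun, hv]
    · exact ih _ (by omega)
    · left; exact h

theorem loopAux_eq (l : List Int) : ∀ cur long : Int,
    loopAux l cur long = max long (gRun l cur) := by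
  induction l with
  | nil => intro cur long; simp [loopAux, gRun]; omega
  | cons v rest ih =>
    intro cur long
    by_cases hv : v ≠ 0
    · simp [loopAux, gRun, hv, ih]
    · simp [loopAux, gRun, hv, ih]; omega

theorem gRun_split (l : List Int) : ∀ cur : Int, 0 ≤ cur →
    gRun l cur = max (cur + ((l.takeWhile (fun y => y != 0)).length : Int))
                     (gRun (l.dropWhile (fun y => y != 0)) 0) := by
  induction l with
  | nil => intro cur h; simp [gRun]; omega
  | cons v rest ih =>
    intro cur h
    by_cases hv : v ≠ 0
    · have hb : (v != 0) = true := by simpa [bne_iff_ne] using hv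
      simp [gRun, hv, hb, ih (cur + 1) (by omega)]
      omega
    · have hb : (v != 0) = false := by simpa [bne_iff_ne] using hv
      have hn := gRun_nonneg rest 0 le_rfl
      simp [gRun, hv, hb]
      omega

theorem altAux_eq : ∀ (n : ℕ) (l : List Int), l.length ≤ n → ∀ best : Int, 0 ≤ best →
    loopAltAux l best = max best (gRun l 0) := by
  intro n
  induction n with
  | zero =>
    intro l hl best hb
    have : l = [] := List.eq_nil_of_length_eq_zero (Nat.le_zero.mp hl)
    subst this; simp [loopAltAux, gRun]; omega
  | succ n ih =>
    intro l hl best hb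
    cases l with
    | nil => simp [loopAltAux, gRun]; omega
    | cons x xs =>
      by_cases hx : x ≠ 0
      · have hdrop : (xs.dropWhile (fun y => y != 0)).length ≤ n :=
          le_trans (List.length_dropWhile_le _ _) (by simpa using Nat.lt_succ_iff.mp (Nat.lt_of_lt_of_le (by simp) hl))
        have hrec := ih _ hdrop (max best (1 + ((xs.takeWhile (fun y => y != 0)).length : Int))) (by positivity)
        have hsplit := gRun_split xs 1 (by omega)
        simp [loopAltAux, hx, hrec, gRun, hsplit]
      · have hxs : xs.length ≤ n := by simpa using Nat.lt_succ_iff.mp (Nat.lt_of_lt_of_le (by simp) hl)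
        have hn := gRun_nonneg xs 0 le_rfl
        simp [loopAltAux, hx, ih xs hxs best hb, gRun]
        omega

-- ===== VERDICT (by name: the statement is the Claim_ definition above) =====
theorem loop_spec : Claim_equal_loop := by
  intro l _
  unfold Spec_loop loop loop_alt
  have h1 := loopAux_eq l 0 0
  have h2 := altAux_eq l.length l le_rfl 0 le_rfl
  have hn := gRun_nonneg l 0 le_rfl
  omega
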